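-- pv_equiv track=rewrite | github.com/hunterhogan/mapFolding | mapFolding.py | countMinimumParsePoints
-- ===== SOURCE A (Python) =====
-- def countMinimumParsePoints(dimensions: list[int]) -> int:
--     """Calculates the minimum number of parse points needed for map folding.
--     This method determines the minimum number of points where parallel computation
--     can safely parse the folding calculation tree without overcounting. It analyzes
--     the dimensions of the map to find positions where the folding process can be
--     divided into concurrent subtasks.
--     Parameters:
--         dimensions: List of integers representing the dimensions of the map.
--             Each integer represents the size of one dimension.
--     Returns:
--         COUNTreachesParsePoint: The minimum number of parse points available for safe concurrent computation
--             of map foldings.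
--     """
--     # Calculate total leaves
--     leavesTotal = 1
--     for dimensionSize in dimensions:
--         leavesTotal *= dimensionSize
--
--     """If the number of `computationDivisions` is more than the number
--     of times we reach the parse point, the concurrent processes will
--     overcount the foldings. If a subtree will cross the parse point at
--     least once, it is safe to divide the computation once. So, the minimum
--     number of subtrees that can be parsed out is the maximum number of
--     parsings: `computerDivisions`. *
--
--     If this is true, perhaps generalize the calculation to k-degrees, then pass k as a parameter.
--
--     Or, if the entire problem can be reliably divided into the exact number of divisions, then
--     the first step should be to devolve the problem into the divisions. Second, use simplier
--     logic to count the foldings in a division. Third, sum the results of the divisions. Therefore,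
--     it's nearly certain that we don't know how to reliably calculate the number of divisions.
--
--     But, is it possible to: calculate the 1st degree of divisions. Then each time the worker arrives at the
--     parse point, the worker stops, divides their current tree into one more degree of divisions, and
--     "records" the entry point to those divisions.
--     """
--
--     # For each leaf for each dimension of the map, do we reach the parse point at least once
--     COUNTreachesParsePoint = sum(1 for potentialDivision in range(1, leavesTotal + 1)
--                                 if any(potentialDivision == 1 or potentialDivision - dimensionSize >= 1
--                                       for dimensionSize in dimensions))
--     return COUNTreachesParsePoint
-- ===== SOURCE B (Python) =====
-- def _balancedProduct(xs):
--     """Product of a nonempty list, multiplying balanced halves (fast for big ints)."""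
--     if len(xs) == 1:
--         return xs[0]
--     mid = len(xs) // 2
--     return _balancedProduct(xs[:mid]) * _balancedProduct(xs[mid:])
--
-- def countMinimumParsePoints(dimensions: list[int]) -> int:
--     """Closed form: count p in 1..prod(dimensions) with p == 1 or p > min(dimensions)."""
--     if not dimensions:
--         return 0
--     leavesTotal = _balancedProduct(dimensions)
--     if leavesTotal < 1:
--         return 0
--     return 1 + max(0, leavesTotal - max(min(dimensions), 1))
-- ===== Notes on version B (the rewrite author's own statement) =====
-- stated objective: faster
-- what changed: B replaces A's scan over every candidate division 1..prod(dimensions) (testing each against all dimensions) by a closed form 1 + max(0, leavesTotal - max(min(dimensions), 1)), with the product computed by balanced divide-and-conquer multiplication.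
import Mathlib
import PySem

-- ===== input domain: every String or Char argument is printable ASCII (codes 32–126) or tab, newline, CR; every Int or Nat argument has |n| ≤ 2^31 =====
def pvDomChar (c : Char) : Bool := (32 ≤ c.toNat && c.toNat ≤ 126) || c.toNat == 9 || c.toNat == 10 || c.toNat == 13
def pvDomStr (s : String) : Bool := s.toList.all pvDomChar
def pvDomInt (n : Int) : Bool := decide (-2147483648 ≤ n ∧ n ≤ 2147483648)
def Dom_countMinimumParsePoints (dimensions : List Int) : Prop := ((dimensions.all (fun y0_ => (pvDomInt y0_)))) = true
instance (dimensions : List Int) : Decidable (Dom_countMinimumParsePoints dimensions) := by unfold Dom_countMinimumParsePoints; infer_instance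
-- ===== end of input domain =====

-- B replaces A's scan over all 1..prod(dimensions) candidates by a closed form
-- 1 + max(0, L - max(min(dimensions), 1)); intended as faster (A times out where B returns;
-- a timing run could not measure a clean ratio at the largest size).


-- ===== PORT A =====
def countMinimumParsePoints (dimensions : List Int) : Int :=
  let leavesTotal := dimensions.foldl (fun acc dimensionSize => acc * dimensionSize) 1
  (PySem.List.pyRange 1 (leavesTotal + 1) 1).foldl
    (fun acc potentialDivision =>
      if dimensions.any (fun dimensionSize =>
          potentialDivision == 1 || decide (1 ≤ potentialDivision - dimensionSize)) then
        acc + 1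
      else acc) 0

-- ===== PORT B =====
-- balanced (divide-and-conquer) product of B's `_balancedProduct`
def pvProd : List Int → Int
  | [] => 1
  | [x] => x
  | x :: y :: rest =>
    pvProd ((x :: y :: rest).take ((x :: y :: rest).length / 2)) *
    pvProd ((x :: y :: rest).drop ((x :: y :: rest).length / 2))
termination_by l => l.length
decreasing_by
  · simp [List.length_take]; omega
  · simp; omega

def countMinimumParsePoints_alt (dimensions : List Int) : Int :=
  match dimensions with
  | [] => 0
  | d :: ds =>
    let leavesTotal := pvProd (d :: ds)
    if leavesTotal < 1 then 0
    else 1 + max 0 (leavesTotal - max (ds.foldl min d) 1)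

-- ===== PRECONDITION & SPEC =====
def Spec_countMinimumParsePoints (dimensions : List Int) (out : Int) : Prop := out = countMinimumParsePoints_alt dimensions
instance (dimensions : List Int) (out : Int) : Decidable (Spec_countMinimumParsePoints dimensions out) := by unfold Spec_countMinimumParsePoints; infer_instance

-- ===== CLAIM (what is proved, stated in full; the proofs are below) =====
def Claim_equal_countMinimumParsePoints : Prop := ∀ (dimensions : List Int), Dom_countMinimumParsePoints dimensions → Spec_countMinimumParsePoints dimensions (countMinimumParsePoints dimensions)

-- ===== LEMMAS AND PROOFS =====

-- counting foldl = countP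
lemma pv_foldl_count (c : Int → Bool) (l : List Int) : ∀ init : Int,
    l.foldl (fun acc p => if c p then acc + 1 else acc) init = init + l.countP c := by
  induction l with
  | nil => simp
  | cons x xs ih =>
    intro init
    simp only [List.foldl_cons, List.countP_cons, ih]
    by_cases h : c x = true <;> simp [h] <;> omega

lemma pv_foldl_min_le_iff (ds : List Int) : ∀ (d y : Int),
    ds.foldl min d ≤ y ↔ (d ≤ y ∨ ∃ x ∈ ds, x ≤ y) := by
  induction ds with
  | nil => simp
  | cons e es ih =>
    intro d y
    simp only [List.foldl_cons, ih, min_le_iff, List.mem_cons]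
    constructor
    · rintro (⟨h | h⟩ | ⟨x, hx, hxy⟩)
      · exact Or.inl h
      · exact Or.inr ⟨e, Or.inl rfl, h⟩
      · exact Or.inr ⟨x, Or.inr hx, hxy⟩
    · rintro (h | ⟨x, (rfl | hx), hxy⟩)
      · exact Or.inl (Or.inl h)
      · exact Or.inl (Or.inr hxy)
      · exact Or.inr ⟨x, hx, hxy⟩

-- A's `any` predicate at point p, for a nonempty list, is p = 1 ∨ min + 1 ≤ p
lemma pv_any_iff (d : Int) (ds : List Int) (p : Int) :
    ((d :: ds).any (fun x => p == 1 || decide (1 ≤ p - x)) = true)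
      ↔ (p = 1 ∨ ds.foldl min d + 1 ≤ p) := by
  rw [List.any_eq_true]
  constructor
  · rintro ⟨x, hx, hb⟩
    rcases Bool.or_eq_true_iff.mp hb with h | h
    · exact Or.inl (by simpa using h)
    · refine Or.inr ?_
      have hx' : x ≤ p - 1 := by have := of_decide_eq_true h; omega
      have : ds.foldl min d ≤ p - 1 := by
        rcases List.mem_cons.mp hx with h' | hm
        · rw [h'] at hx'
          exact (pv_foldl_min_le_iff ds d (p-1)).mpr (Or.inl hx')
        · exact (pv_foldl_min_le_iff ds d (p-1)).mpr (Or.inr ⟨x, hm, hx'⟩)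
      omega
  · rintro (rfl | h)
    · exact ⟨d, List.mem_cons_self, by simp⟩
    · have : ds.foldl min d ≤ p - 1 := by omega
      rcases (pv_foldl_min_le_iff ds d (p-1)).mp this with h' | ⟨x, hx, hx'⟩
      · exact ⟨d, List.mem_cons_self, by simp; omega⟩
      · exact ⟨x, List.mem_cons.mpr (Or.inr hx), by simp; omega⟩

-- closed form for the count over range n of (k = 0 ∨ m ≤ k)
lemma pv_count_formula (m : Int) : ∀ n : Nat,
    ((List.countP (fun (k : Nat) => decide ((k : Int) = 0 ∨ m ≤ (k : Int))) (List.range n)) : Int)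
      = if n = 0 then 0 else 1 + max 0 ((n : Int) - max m 1) := by
  intro n
  induction n with
  | zero => simp
  | succ n ih =>
    rw [List.range_succ, List.countP_append, Int.natCast_add, ih,
      if_neg (Nat.succ_ne_zero n)]
    rcases le_total m 1 with hm | hm
    · rw [max_eq_right hm]
      by_cases h : ((n : Int) = 0 ∨ m ≤ (n : Int)) <;>
        · simp only [h, decide_true, decide_false, List.countP_cons, List.countP_nil]
          split_ifs <;> (try exact (‹False›).elim) <;> push_cast <;> omega
    · rw [max_eq_left hm]
      by_cases h : ((n : Int) = 0 ∨ m ≤ (n : Int)) <;>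
        · simp only [h, decide_true, decide_false, List.countP_cons, List.countP_nil]
          split_ifs <;> (try exact (‹False›).elim) <;> push_cast <;> omega

-- the whole A-side loop over range(1, L+1), for a nonempty dimension list, in closed form
lemma pv_key (L d : Int) (ds : List Int) :
    (PySem.List.pyRange 1 (L + 1) 1).foldl
        (fun acc p => if (d :: ds).any (fun x => p == 1 || decide (1 ≤ p - x)) then acc + 1 else acc) 0
      = if L < 1 then 0 else 1 + max 0 (L - max (ds.foldl min d) 1) := by
  rw [pv_foldl_count, PySem.List.pyRange_one]
  have hcong : List.countP
        (fun p => (d :: ds).any (fun x => p == 1 || decide (1 ≤ p - x)))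
        (List.map (fun (k : Nat) => (1 : Int) + (k : Int)) (List.range (L + 1 - 1).toNat))
      = List.countP (fun (k : Nat) => decide ((k : Int) = 0 ∨ ds.foldl min d ≤ (k : Int)))
          (List.range (L + 1 - 1).toNat) := by
    rw [List.countP_map]
    apply List.countP_congr
    intro k _
    simp only [Function.comp]
    rw [Bool.eq_iff_iff, pv_any_iff, decide_eq_true_iff]
    generalize ds.foldl min d = mv
    simp only [iff_true]
    omega
  rw [hcong, pv_count_formula]
  have h1 : L + 1 - 1 = L := by ring
  rw [h1]
  by_cases hpos : L < 1
  · have h0 : L.toNat = 0 := by omega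
    simp [h0, hpos]
  · have hn0 : L.toNat ≠ 0 := by omega
    have hc : ((L.toNat : Int)) = L := by omega
    rw [if_neg hn0, if_neg hpos, hc]
    ring

lemma pvProd_eq_prod (l : List Int) : pvProd l = l.prod := by
  induction l using pvProd.induct with
  | case1 => simp [pvProd]
  | case2 x => simp [pvProd]
  | case3 x y rest ih1 ih2 =>
    rw [pvProd, ih1, ih2, ← List.prod_append, List.take_append_drop]

lemma pv_foldl_mul_eq_prod (l : List Int) : l.foldl (fun acc x => acc * x) 1 = l.prod := by
  rw [List.prod_eq_foldl]

theorem countMinimumParsePoints_spec_aux (dimensions : List Int) :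
    countMinimumParsePoints dimensions = countMinimumParsePoints_alt dimensions := by
  cases dimensions with
  | nil =>
    simp [countMinimumParsePoints, countMinimumParsePoints_alt]
  | cons d ds =>
    simp only [countMinimumParsePoints, countMinimumParsePoints_alt]
    rw [pv_foldl_mul_eq_prod, ← pvProd_eq_prod]
    exact pv_key (pvProd (d :: ds)) d ds

-- ===== VERDICT (by name: the statement is the Claim_ definition above) =====
theorem countMinimumParsePoints_spec : Claim_equal_countMinimumParsePoints := by
  intro dimensions _
  exact countMinimumParsePoints_spec_aux dimensions
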